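-- pv_equiv track=rewrite | github.com/FrankenW1/CS2233 | exam_corrections/exam1corrections.py | return_last_match
-- ===== SOURCE A (Python) =====
-- from typing import List, Callable, Any, Iterable
--
-- list_of_names: List[str] = [
--     "alex",
--     "amanda",
--     "aaron",
--     "charlie",
--     "vision",
--     "wanda",
--     "tommy",
--     "sophie",
-- ]
--
-- def return_last_match(input_str: str) -> str:
--     tl = []
--     for i in range(len(list_of_names)):
--         t = list_of_names[i]
--         if input_str == t[-1]:
--             tl.append(t)
--         for i in range(len(tl)):
--             return tl[i]
-- ===== SOURCE B (Python) =====
-- list_of_names = [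
--     "alex",
--     "amanda",
--     "aaron",
--     "charlie",
--     "vision",
--     "wanda",
--     "tommy",
--     "sophie",
-- ]
--
-- def return_last_match(input_str):
--     last_char_map = {}
--     for name in list_of_names:
--         last_char_map.setdefault(name[-1], name)
--     return last_char_map.get(input_str)
-- ===== Notes on version B (the rewrite author's own statement) =====
-- stated objective: idiomatic
-- what changed: Replaces the early-exit nested-loop scan with a one-pass last-char->first-name index built via setdefault, then a single dict lookup.
import Mathlib
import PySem

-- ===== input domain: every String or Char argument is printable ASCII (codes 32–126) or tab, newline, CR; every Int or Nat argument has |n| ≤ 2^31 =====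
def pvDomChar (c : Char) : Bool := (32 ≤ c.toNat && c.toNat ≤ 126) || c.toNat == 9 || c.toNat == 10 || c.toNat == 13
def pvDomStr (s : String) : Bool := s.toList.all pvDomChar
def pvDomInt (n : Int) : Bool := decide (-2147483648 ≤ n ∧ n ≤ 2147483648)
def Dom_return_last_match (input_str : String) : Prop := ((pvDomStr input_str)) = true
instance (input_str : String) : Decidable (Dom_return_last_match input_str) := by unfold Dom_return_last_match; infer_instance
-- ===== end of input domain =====

-- B replaces A's early-exit nested-loop scan with a one-pass last-char→first-name index (setdefault) plus a single dict lookup (idiomatic; same cost).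

-- ===== PORT A =====
def pvListOfNames : List String :=
  ["alex", "amanda", "aaron", "charlie", "vision", "wanda", "tommy", "sophie"]

-- t[-1] (a 1-char string); the "" branch is unreachable (all names nonempty), kept only for totality
def pvLastChar (t : String) : String :=
  match PySem.Str.pyGet? t (-1) with
  | some c => String.ofList [c]
  | none => ""

-- the outer 'for i in range(len(list_of_names))' loop with accumulator tl;
-- the inner 'for i in range(len(tl)): return tl[i]' is 'return tl[0] as soon as tl ≠ []'
def pvALoop (input_str : String) : List Int → List String → Option String
  | [], _ => none
  | i :: rest, tl =>
    match PySem.List.pyGet? pvListOfNames i with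
    | none => none   -- IndexError; unreachable, indices come from range(len(list_of_names))
    | some t =>
      let tl' := if input_str == pvLastChar t then tl ++ [t] else tl
      match tl' with
      | x :: _ => some x
      | [] => pvALoop input_str rest tl'

def return_last_match (input_str : String) : Option String :=
  pvALoop input_str (PySem.List.pyRange 0 (Int.ofNat pvListOfNames.length) 1) []

-- ===== PORT B =====
-- last_char_map built once via setdefault (first name with a given last char wins)
def pvLastCharMap : PySem.Dict String String :=
  pvListOfNames.foldl (fun d name => d.setdefault (pvLastChar name) name) PySem.Dict.empty

def return_last_match_alt (input_str : String) : Option String :=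
  pvLastCharMap.get? input_str

-- ===== PRECONDITION & SPEC =====
def Spec_return_last_match (input_str : String) (out : Option String) : Prop := out = return_last_match_alt input_str
instance (input_str : String) (out : Option String) : Decidable (Spec_return_last_match input_str out) := by unfold Spec_return_last_match; infer_instance

-- ===== CLAIM (what is proved, stated in full; the proofs are below) =====
def Claim_equal_return_last_match : Prop := ∀ (input_str : String), Dom_return_last_match input_str → Spec_return_last_match input_str (return_last_match input_str)

-- ===== LEMMAS AND PROOFS =====

-- ===== VERDICT (by name: the statement is the Claim_ definition above) =====
theorem return_last_match_spec : Claim_equal_return_last_match := by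
  intro s _
  unfold Spec_return_last_match
  by_cases h1 : s = "x"; · subst h1; decide
  by_cases h2 : s = "a"; · subst h2; decide
  by_cases h3 : s = "n"; · subst h3; decide
  by_cases h4 : s = "e"; · subst h4; decide
  by_cases h5 : s = "y"; · subst h5; decide
  simp only [return_last_match,
    show PySem.List.pyRange 0 (Int.ofNat pvListOfNames.length) 1 = [0,1,2,3,4,5,6,7] from by decide]
  simp [pvALoop, return_last_match_alt, pvLastCharMap, pvListOfNames,
    PySem.Dict.get?, PySem.Dict.setdefault, PySem.Dict.empty,
    PySem.Dict.contains,
    beq_eq_false_iff_ne.mpr (Ne.symm h1), beq_eq_false_iff_ne.mpr (Ne.symm h2),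
    beq_eq_false_iff_ne.mpr (Ne.symm h3), beq_eq_false_iff_ne.mpr (Ne.symm h4),
    beq_eq_false_iff_ne.mpr (Ne.symm h5), h1, h2, h3, h4, h5,
    show pvLastChar "alex" = "x" from by decide,
    show pvLastChar "amanda" = "a" from by decide,
    show pvLastChar "aaron" = "n" from by decide,
    show pvLastChar "charlie" = "e" from by decide,
    show pvLastChar "vision" = "n" from by decide,
    show pvLastChar "wanda" = "a" from by decide,
    show pvLastChar "tommy" = "y" from by decide,
    show pvLastChar "sophie" = "e" from by decide]
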